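-- pv_equiv track=rewrite | github.com/modianor/spider-framework | framework/core/common_spider/text_parse.py | get_item_len
-- ===== SOURCE A (Python) =====
-- def get_item_len(items):
--     param_lists = list(items.values())
--
--     if len(param_lists) == 0:
--         return 0
--
--     init_len = len(param_lists[0])
--
--     for single_params in param_lists:
--         if len(single_params) != init_len:
--             return 0
--
--     return init_len
-- ===== SOURCE B (Python) =====
-- def get_item_len(items):
--     lengths = {len(v) for v in items.values()}
--     return lengths.pop() if len(lengths) == 1 else 0
-- ===== Notes on version B (the rewrite author's own statement) =====
-- stated objective: idiomatic
-- what changed: Replaces the init-length-plus-comparison loop over values with a set comprehension of all value lengths, returning the sole distinct length when the set is a singleton and 0 otherwise.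
import Mathlib
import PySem

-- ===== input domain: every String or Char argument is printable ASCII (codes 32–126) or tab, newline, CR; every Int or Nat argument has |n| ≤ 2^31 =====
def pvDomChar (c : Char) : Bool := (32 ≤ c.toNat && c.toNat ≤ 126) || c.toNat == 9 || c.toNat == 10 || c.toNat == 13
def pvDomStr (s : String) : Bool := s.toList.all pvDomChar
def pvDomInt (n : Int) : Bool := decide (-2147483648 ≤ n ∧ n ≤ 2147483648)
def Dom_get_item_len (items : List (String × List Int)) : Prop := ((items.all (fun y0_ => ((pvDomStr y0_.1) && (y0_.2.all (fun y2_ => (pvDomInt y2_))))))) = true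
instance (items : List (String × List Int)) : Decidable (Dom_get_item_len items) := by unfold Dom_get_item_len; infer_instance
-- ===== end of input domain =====

-- B replaces A's init-length-plus-comparison loop with a set of all value lengths (idiomatic; same cost).

-- ===== PORT A =====
-- the 'for single_params in param_lists' loop with its early 'return 0'
def pvCheckA (init : Int) : List (List Int) → Int
  | [] => init
  | p :: rest => if (p.length : Int) ≠ init then 0 else pvCheckA init rest

def get_item_len (items : List (String × List Int)) : Int :=
  let param_lists := (PySem.Dict.ofList items).values
  match param_lists with
  | [] => 0
  | first :: _ => pvCheckA (first.length : Int) param_lists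

-- ===== PORT B =====
def get_item_len_alt (items : List (String × List Int)) : Int :=
  let lengths : PySem.Set Int :=
    PySem.Set.ofList (((PySem.Dict.ofList items).values).map (fun v => (v.length : Int)))
  match lengths with
  | [x] => x
  | _ => 0

-- ===== PRECONDITION & SPEC =====
def Spec_get_item_len (items : List (String × List Int)) (out : Int) : Prop := out = get_item_len_alt items
instance (items : List (String × List Int)) (out : Int) : Decidable (Spec_get_item_len items out) := by unfold Spec_get_item_len; infer_instance

-- ===== CLAIM (what is proved, stated in full; the proofs are below) =====
def Claim_equal_get_item_len : Prop := ∀ (items : List (String × List Int)), Dom_get_item_len items → Spec_get_item_len items (get_item_len items)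

-- ===== LEMMAS AND PROOFS =====

theorem pvCheckA_eq (init : Int) (ls : List (List Int)) :
    pvCheckA init ls = if ls.all (fun p => (p.length : Int) == init) then init else 0 := by
  induction ls with
  | nil => simp [pvCheckA]
  | cons p rest ih =>
    by_cases h : (p.length : Int) = init
    · simp [pvCheckA, h, ih]
    · simp [pvCheckA, h]

theorem pvOfList_all_eq {xs : List Int} {c : Int} (h : ∀ y ∈ xs, y = c) :
    PySem.Set.ofList (c :: xs) = [c] := by
  induction xs with
  | nil => simp [PySem.Set.ofList_nil, PySem.Set.ofList_cons, PySem.Set.discard]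
  | cons x xs ih =>
    have hx : x = c := h x (by simp)
    have hrest : ∀ y ∈ xs, y = c := fun y hy => h y (by simp [hy])
    have := ih hrest
    subst hx
    rw [PySem.Set.ofList_cons] at this ⊢
    rw [PySem.Set.ofList_cons]
    simpa [PySem.Set.discard] using this

theorem pvCore (ls : List (List Int)) :
    (match ls with
     | [] => (0 : Int)
     | first :: _ => pvCheckA (first.length : Int) ls)
    = (match PySem.Set.ofList (ls.map (fun v => (v.length : Int))) with
       | [x] => x
       | _ => 0) := by
  cases ls with
  | nil => simp [PySem.Set.ofList_nil]
  | cons f rest =>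
    simp only [pvCheckA_eq]
    by_cases h : ∀ p ∈ rest, (p.length : Int) = (f.length : Int)
    · have hall : (f :: rest).all (fun p => (p.length : Int) == (f.length : Int)) = true := by
        simp only [List.all_eq_true, beq_iff_eq]
        intro p hp
        rcases List.mem_cons.mp hp with rfl | hp
        · rfl
        · exact h p hp
      have hset : PySem.Set.ofList ((f :: rest).map (fun v => (v.length : Int)))
          = [(f.length : Int)] := by
        simp only [List.map_cons]
        apply pvOfList_all_eq
        intro y hy
        obtain ⟨p, hp, rfl⟩ := List.mem_map.mp hy
        exact h p hp
      rw [hall, hset]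
      simp
    · have hall : (f :: rest).all (fun p => (p.length : Int) == (f.length : Int)) = false := by
        simp only [List.all_eq_false, beq_iff_eq]
        push Not at h
        obtain ⟨p, hp, hne⟩ := h
        exact ⟨p, List.mem_cons_of_mem f hp, hne⟩
      rw [hall, if_neg (by simp)]
      -- the set contains two distinct elements, so it is not a singleton
      push Not at h
      obtain ⟨p, hp, hne⟩ := h
      have hf : (f.length : Int) ∈ PySem.Set.ofList ((f :: rest).map (fun v => (v.length : Int))) := by
        rw [PySem.Set.mem_ofList]; exact List.mem_map.mpr ⟨f, by simp, rfl⟩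
      have hpmem : (p.length : Int) ∈ PySem.Set.ofList ((f :: rest).map (fun v => (v.length : Int))) := by
        rw [PySem.Set.mem_ofList]; exact List.mem_map.mpr ⟨p, by simp [hp], rfl⟩
      match hs : PySem.Set.ofList ((f :: rest).map (fun v => (v.length : Int))) with
      | [] => rw [hs]
      | [x] =>
        rw [hs] at hf hpmem
        simp at hf hpmem
        exact absurd (hpmem.trans hf.symm) hne
      | x :: y :: zs => rw [hs]

-- ===== VERDICT (by name: the statement is the Claim_ definition above) =====
theorem get_item_len_spec : Claim_equal_get_item_len := by
  intro items _
  unfold Spec_get_item_len get_item_len get_item_len_alt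
  exact pvCore ((PySem.Dict.ofList items).values)
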